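-- pv_equiv track=rewrite | github.com/FNA2003/grupo1-tp1-v1 | lexer/AFDs.py | afd_if
-- ===== SOURCE A (Python) =====
-- def afd_if(cadena):
--     """El estado aceptado es 2"""
--     estados_sin_trampa = [0, 1, 2]
--     estados_aceptados = [2]
--     estados_no_aceptados = [0, 1]
--     estado_trampa = 't'
--     estado = 0
--     caracteres = ['i', 'f']
--     delta = {
--     0: {'i': 1, 'f': 't'},
--     1: {'i': 't', 'f': 2},
--     2: {'i': 't', 'f': 't'},
--     't': {'i': 't', 'f': 't'}
--     }
--
--     for caracter in cadena:
--         if (estado in estados_sin_trampa) and (caracter in caracteres):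
--             estado = delta[estado][caracter]
--         elif (estado == 't') or not(caracter in caracteres):
--             estado = 't'
--             break
--
--     if estado in estados_aceptados:
--         estado_final = 'aceptado'
--     elif estado in estados_no_aceptados:
--         estado_final = 'no aceptado'
--     elif estado == estado_trampa:
--         estado_final = 'trampa'
--
--     return estado_final
-- ===== SOURCE B (Python) =====
-- def afd_if(cadena):
--     """Direct structural comparison instead of simulating the DFA."""
--     chars = list(cadena)
--     if chars == ['i', 'f']:
--         return 'aceptado'
--     if chars == [] or chars == ['i']:
--         return 'no aceptado'
--     return 'trampa'
-- ===== Notes on version B (the rewrite author's own statement) =====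
-- stated objective: simpler
-- what changed: Replaced the simulated DFA (state variable, transition dict, break logic) by a direct structural comparison of the materialized character list against the three shapes the automaton accepts or half-accepts.
import Mathlib
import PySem

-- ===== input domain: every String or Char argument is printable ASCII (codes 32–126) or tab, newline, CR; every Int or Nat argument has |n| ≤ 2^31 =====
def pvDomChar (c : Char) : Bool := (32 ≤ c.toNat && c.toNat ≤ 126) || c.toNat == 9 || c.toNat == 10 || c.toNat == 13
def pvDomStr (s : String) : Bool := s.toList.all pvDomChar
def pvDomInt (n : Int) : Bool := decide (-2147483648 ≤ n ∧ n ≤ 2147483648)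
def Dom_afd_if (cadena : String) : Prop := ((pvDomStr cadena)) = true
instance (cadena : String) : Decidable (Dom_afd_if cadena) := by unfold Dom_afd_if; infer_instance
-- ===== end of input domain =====

-- B replaces A's simulated DFA (state loop + transition dict) with a direct structural comparison of the character list; same results, simpler.


-- ===== PORT A =====
-- DFA state: 0,1,2 or trap 't'
inductive AfdSt | s0 | s1 | s2 | t
deriving DecidableEq

def afdDelta : AfdSt → Char → AfdSt
  | AfdSt.s0, 'i' => AfdSt.s1
  | AfdSt.s0, 'f' => AfdSt.t
  | AfdSt.s1, 'i' => AfdSt.t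
  | AfdSt.s1, 'f' => AfdSt.s2
  | _, _ => AfdSt.t

-- the `for` loop of A, with its `break` (returning the state 't' ends the loop)
def afdLoop : List Char → AfdSt → AfdSt
  | [], e => e
  | c :: rest, e =>
    if e ≠ AfdSt.t ∧ (c = 'i' ∨ c = 'f') then afdLoop rest (afdDelta e c)
    else if e = AfdSt.t ∨ ¬ (c = 'i' ∨ c = 'f') then AfdSt.t  -- break
    else afdLoop rest e

def afd_if (cadena : String) : String :=
  let estado := afdLoop cadena.toList AfdSt.s0
  if estado = AfdSt.s2 then "aceptado"
  else if estado = AfdSt.s0 ∨ estado = AfdSt.s1 then "no aceptado"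
  else "trampa"

-- ===== PORT B =====
def afd_if_alt (cadena : String) : String :=
  let chars := cadena.toList
  if chars = ['i', 'f'] then "aceptado"
  else if chars = [] ∨ chars = ['i'] then "no aceptado"
  else "trampa"

-- ===== PRECONDITION & SPEC =====
def Spec_afd_if (cadena : String) (out : String) : Prop := out = afd_if_alt cadena
instance (cadena : String) (out : String) : Decidable (Spec_afd_if cadena out) := by unfold Spec_afd_if; infer_instance

-- ===== CLAIM (what is proved, stated in full; the proofs are below) =====
def Claim_equal_afd_if : Prop := ∀ (cadena : String), Dom_afd_if cadena → Spec_afd_if cadena (afd_if cadena)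

-- ===== LEMMAS AND PROOFS =====
theorem afdLoop_trap : ∀ (l : List Char), afdLoop l AfdSt.t = AfdSt.t := by
  intro l; cases l <;> simp [afdLoop]

-- ===== VERDICT (by name: the statement is the Claim_ definition above) =====
theorem afd_if_spec : Claim_equal_afd_if := by
  intro cadena _
  unfold Spec_afd_if afd_if afd_if_alt
  cases hl : cadena.toList with
  | nil => simp [afdLoop]
  | cons c rest =>
    by_cases hc : c = 'i'
    · subst hc
      cases rest with
      | nil => simp [afdLoop, afdDelta]
      | cons d rest2 =>
        by_cases hd : d = 'f'
        · subst hd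
          cases rest2 with
          | nil => simp [afdLoop, afdDelta]
          | cons e rest3 =>
            by_cases he : e = 'i' ∨ e = 'f'
            · simp [afdLoop, afdDelta, he, afdLoop_trap]
            · simp [afdLoop, afdDelta, not_or.mp he]
        · by_cases hdi : d = 'i'
          · subst hdi
            simp [afdLoop, afdDelta, afdLoop_trap, hd]
          · simp [afdLoop, afdDelta, hd, hdi]
    · by_cases hcf : c = 'f'
      · subst hcf
        simp [afdLoop, afdDelta, afdLoop_trap, hc]
      · simp [afdLoop, hc, hcf]
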